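-- pv_equiv track=rewrite | github.com/p-lots/codewars | 7-kyu/capitals-first!/python/solution.py | capitals_first
-- ===== SOURCE A (Python) =====
-- def capitals_first(text):
--     capitals = []
--     lowers = []
--     for word in text.split():
--         if word[0].isupper():
--             capitals.append(word)
--         elif word[0].islower():
--             lowers.append(word)
--     return ' '.join(capitals + lowers)
-- ===== SOURCE B (Python) =====
-- def capitals_first(text):
--     words = [w for w in text.split() if w[0].isupper() or w[0].islower()]
--     return ' '.join(sorted(words, key=lambda w: not w[0].isupper()))
-- ===== Notes on version B (the rewrite author's own statement) =====
-- stated objective: idiomatic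
-- what changed: Replaced the explicit two-bucket partition loop with a filter plus a single stable sort keyed on 'not first-char-is-upper', relying on sort stability to keep capitals before lowers in original order.
import Mathlib
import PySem

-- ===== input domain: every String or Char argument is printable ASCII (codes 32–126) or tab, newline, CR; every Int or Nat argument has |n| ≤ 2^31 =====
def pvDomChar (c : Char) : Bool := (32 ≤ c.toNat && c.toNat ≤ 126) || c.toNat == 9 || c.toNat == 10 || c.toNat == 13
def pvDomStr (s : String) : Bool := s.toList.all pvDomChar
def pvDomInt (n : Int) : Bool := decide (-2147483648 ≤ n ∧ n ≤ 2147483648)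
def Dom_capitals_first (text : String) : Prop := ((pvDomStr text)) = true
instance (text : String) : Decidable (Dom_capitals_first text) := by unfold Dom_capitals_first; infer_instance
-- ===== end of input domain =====

-- B replaces A's explicit two-bucket partition by a filter plus one stable sort on a boolean-like key (idiomatic, same result).

-- ===== PORT A =====
-- word[0].isupper() / word[0].islower() for a word produced by split() (always nonempty)
def hdCap (w : String) : Bool :=
  match w.toList with
  | [] => false
  | c :: _ => PySem.Chars.isupper c

def hdLow (w : String) : Bool :=
  match w.toList with
  | [] => false
  | c :: _ => PySem.Chars.islower c

-- the loop body of A: append the word to capitals, to lowers, or drop it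
def stepA (st : List String × List String) (word : String) : List String × List String :=
  if hdCap word then (st.1 ++ [word], st.2)
  else if hdLow word then (st.1, st.2 ++ [word])
  else st

def capitals_first (text : String) : String :=
  let st := (PySem.Str.split₀ text).foldl stepA ([], [])
  PySem.Str.join " " (st.1 ++ st.2)

-- ===== PORT B =====
-- sort key 'not w[0].isupper()' (False = 0 sorts first)
def keyB (w : String) : Nat := if hdCap w then 0 else 1

def capitals_first_alt (text : String) : String :=
  let words := (PySem.Str.split₀ text).filter (fun w => hdCap w || hdLow w)
  PySem.Str.join " " (PySem.List.sorted words keyB false)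

-- ===== PRECONDITION & SPEC =====
def Spec_capitals_first (text : String) (out : String) : Prop := out = capitals_first_alt text
instance (text : String) (out : String) : Decidable (Spec_capitals_first text out) := by unfold Spec_capitals_first; infer_instance

-- ===== CLAIM (what is proved, stated in full; the proofs are below) =====
def Claim_equal_capitals_first : Prop := ∀ (text : String), Dom_capitals_first text → Spec_capitals_first text (capitals_first text)

-- ===== LEMMAS AND PROOFS =====

-- A's loop computes the two filters
theorem foldA_eq (ws : List String) : ∀ (caps lows : List String),
    ws.foldl stepA (caps, lows) =
      (caps ++ ws.filter hdCap, lows ++ ws.filter (fun w => !hdCap w && hdLow w)) := by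
  induction ws with
  | nil => intro caps lows; simp
  | cons w t ih =>
    intro caps lows
    simp only [List.foldl_cons, stepA, List.filter_cons]
    by_cases hc : hdCap w
    · simp [hc, ih]
    · by_cases hl : hdLow w
      · simp [hc, hl, ih]
      · simp [hc, hl, ih]

-- inserting into A ++ B where A holds the key-0 and B the key-1 elements
theorem insertBy_two_bucket (x : String) (A B : List String)
    (hA : ∀ a ∈ A, keyB a = 0) (hB : ∀ b ∈ B, keyB b = 1) :
    PySem.List.insertBy (fun a b => decide (keyB a < keyB b)) x (A ++ B) =
      (if keyB x = 0 then A ++ [x] ++ B else A ++ (B ++ [x])) := by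
  by_cases hx : keyB x = 0
  · simp only [hx, if_pos]
    induction A with
    | nil =>
      simp only [List.nil_append]
      cases B with
      | nil => simp [PySem.List.insertBy]
      | cons b bs =>
        have hb : keyB b = 1 := hB b (by simp)
        simp [PySem.List.insertBy, hx, hb]
    | cons a as ih =>
      have ha : keyB a = 0 := hA a (by simp)
      have : PySem.List.insertBy (fun a b => decide (keyB a < keyB b)) x (as ++ B) =
          as ++ [x] ++ B := ih (fun a h => hA a (by simp [h]))
      simp [PySem.List.insertBy, hx, ha, this]
  · have hx1 : keyB x = 1 := by unfold keyB at *; split_ifs at * <;> simp_all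
    simp only [hx, if_neg, not_false_iff]
    rw [PySem.List.insertBy_of_forall_not_before]
    · simp
    · intro y hy
      rcases List.mem_append.mp hy with h | h
      · have := hA y h; simp [hx1, this]
      · have := hB y h; simp [hx1, this]

-- a stable sort on a {0,1}-valued key is the two filters concatenated
theorem sorted_two_bucket (ws : List String) :
    PySem.List.sorted ws keyB false =
      ws.filter (fun w => keyB w == 0) ++ ws.filter (fun w => keyB w != 0) := by
  rw [PySem.List.sorted_eq_foldl_insertBy]
  suffices h : ∀ (A B : List String), (∀ a ∈ A, keyB a = 0) → (∀ b ∈ B, keyB b = 1) →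
      ws.foldl (fun acc x => PySem.List.insertBy (fun a b => decide (keyB a < keyB b)) x acc) (A ++ B)
        = (A ++ ws.filter (fun w => keyB w == 0)) ++ (B ++ ws.filter (fun w => keyB w != 0)) by
    simpa using h [] [] (by simp) (by simp)
  induction ws with
  | nil => intro A B _ _; simp
  | cons w t ih =>
    intro A B hA hB
    simp only [List.foldl_cons, List.filter_cons]
    rw [insertBy_two_bucket w A B hA hB]
    by_cases hw : keyB w = 0
    · have h2 := ih (A ++ [w]) B
        (by intro a ha; rcases List.mem_append.mp ha with h | h
            · exact hA a h
            · simp at h; simpa [h] using hw) hB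
      simp only [List.append_assoc, List.singleton_append] at h2 ⊢
      simp [hw, h2]
    · have hw1 : keyB w = 1 := by unfold keyB at *; split_ifs at * <;> simp_all
      have := ih A (B ++ [w]) hA
        (by intro b hb; rcases List.mem_append.mp hb with h | h
            · exact hB b h
            · simp at h; simpa [h] using hw1)
      simp [hw, this, List.append_assoc]

-- ===== VERDICT (by name: the statement is the Claim_ definition above) =====
theorem capitals_first_spec : Claim_equal_capitals_first := by
  intro text _
  unfold Spec_capitals_first capitals_first capitals_first_alt
  simp only [foldA_eq, sorted_two_bucket, List.filter_filter, List.nil_append]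
  congr 1
  congr 1
  · apply List.filter_congr
    intro w _
    unfold keyB
    by_cases h : hdCap w <;> simp [h]
  · apply List.filter_congr
    intro w _
    unfold keyB
    by_cases h : hdCap w <;> simp [h]
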